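-- pv_equiv track=rewrite | github.com/fishellVvv/MPO_projects_python | retos_programacion/retos_online/adventofcode_25/day06.py | day06b
-- ===== SOURCE A (Python) =====
-- def day06b(colums):
--     result = 0
--
--     groups = []
--     current = []
--     for col in colums:
--         if all(ch == " " for ch in col):
--             if current:
--                 groups.append(current)
--                 current = []
--         else:
--             current.append(col)
--     if current:
--         groups.append(current)
--
--     problems = []
--     for group in groups:
--         op = None
--         for col in group:
--             if col[-1] != " ":
--                 op = col[-1]
--                 break
--
--         nums = []
--         for col in reversed(group):
--             digits = "".join(ch for ch in col[:-1] if ch.isdigit())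
--             nums.append(int(digits))
--
--         problems.append(nums + [op])
--
--     for problem in problems:
--         sum = 0
--         prod = 1
--
--         if problem[-1] == "+":
--             for num in problem[:-1]:
--                 sum += num
--         else:
--             for num in problem[:-1]:
--                 prod *= num
--
--         if problem[-1] == "+":
--             result += sum
--         else:
--             result += prod
--
--     return result
-- ===== SOURCE B (Python) =====
-- def day06b(colums):
--     # single streaming pass: no intermediate groups/problems lists, no reversed scan
--     result = 0
--     in_group = False
--     op = None
--     acc_sum = 0
--     acc_prod = 1
--     for col in colums:
--         if all(ch == " " for ch in col):
--             if in_group: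
--                 result += acc_sum if op == "+" else acc_prod
--                 in_group = False
--         else:
--             if not in_group:
--                 in_group = True
--                 op = None
--                 acc_sum = 0
--                 acc_prod = 1
--             if op is None and col[-1] != " ":
--                 op = col[-1]
--             n = int("".join(ch for ch in col[:-1] if ch.isdigit()))
--             acc_sum += n
--             acc_prod *= n
--     if in_group:
--         result += acc_sum if op == "+" else acc_prod
--     return result
-- ===== Notes on version B (the rewrite author's own statement) =====
-- stated objective: simpler
-- what changed: B is a single streaming pass that folds each column directly into the running per-group operator/sum/product state and adds a group's value when it closes, instead of A's three sequential phases that materialise a groups list, then a problems list (scanning each group twice, once reversed), then accumulate.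
import Mathlib
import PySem

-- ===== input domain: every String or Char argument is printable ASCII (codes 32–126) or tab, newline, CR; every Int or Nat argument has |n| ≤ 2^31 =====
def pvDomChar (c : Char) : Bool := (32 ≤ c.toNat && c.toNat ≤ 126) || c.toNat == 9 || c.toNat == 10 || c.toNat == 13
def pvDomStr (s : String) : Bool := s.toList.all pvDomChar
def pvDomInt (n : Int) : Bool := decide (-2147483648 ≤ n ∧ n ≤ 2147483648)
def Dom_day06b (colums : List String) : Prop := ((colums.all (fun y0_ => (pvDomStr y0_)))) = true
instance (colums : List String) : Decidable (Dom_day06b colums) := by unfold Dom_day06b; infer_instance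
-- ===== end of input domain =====

-- B replaces A's three phases (groups list, problems list, accumulation) by one streaming pass; equal return values on Pre_.

-- shared helpers: both Pythons compute `all(ch == " " for ch in col)`, `col[-1]` and
-- `int("".join(ch for ch in col[:-1] if ch.isdigit()))` with identical expressions.
def pvBlank (col : String) : Bool := col.toList.all (fun ch => ch == ' ')

-- col[-1]; cols reaching it are non-blank hence nonempty, so the ' ' default is unreachable
def pvLastC (col : String) : Char := (PySem.Str.pyGet? col (-1)).getD ' '

-- col[:-1] is dropLast of the chars; ch.isdigit = Char.isDigit on the ASCII domain (Dom).
-- int(digits): Python raises ValueError when digits is empty; Pre_ excludes that, so getD 0 is unreachable inside Pre_.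
def pvNumOf (col : String) : Int :=
  (PySem.Int.ofChars? (col.toList.dropLast.filter Char.isDigit)).getD 0

-- ===== PORT A =====
-- A's op-search loop with break: last char of the first col whose last char isn't ' '
def pvFindOpA : List String → Option Char
  | [] => none
  | col :: rest =>
    let c := pvLastC col
    if c ≠ ' ' then some c else pvFindOpA rest

-- phase-1 loop body: split at all-space columns
def pvStepA (st : List (List String) × List String) (col : String) :
    List (List String) × List String :=
  if pvBlank col then
    if st.2 ≠ [] then (st.1 ++ [st.2], []) else st
  else (st.1, st.2 ++ [col])

-- phase-2 loop body: problems.append(nums + [op]) — Python's heterogeneous nums + [op] as a pair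
def pvStep2 (probs : List (List Int × Option Char)) (group : List String) :
    List (List Int × Option Char) :=
  let op := pvFindOpA group
  let nums := group.reverse.foldl (fun ns col => ns ++ [pvNumOf col]) []
  probs ++ [(nums, op)]

-- phase-3 loop body: sum-loop and prod-loop, then the repeated operator test
def pvStep3 (result : Int) (p : List Int × Option Char) : Int :=
  let s : Int := if p.2 == some '+' then p.1.foldl (· + ·) 0 else 0
  let pr : Int := if p.2 == some '+' then 1 else p.1.foldl (· * ·) 1
  if p.2 == some '+' then result + s else result + pr

def day06b (colums : List String) : Int :=
  let st := colums.foldl pvStepA ([], [])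
  let groups := if st.2 ≠ [] then st.1 ++ [st.2] else st.1
  let problems := groups.foldl pvStep2 []
  problems.foldl pvStep3 0

-- ===== PORT B =====
-- Source B's in_group flag with its op/acc_sum/acc_prod variables: none = not in_group, some (op, s, p) = in_group
def pvStepB (st : Int × Option (Option Char × Int × Int)) (col : String) :
    Int × Option (Option Char × Int × Int) :=
  if pvBlank col then
    match st.2 with
    | none => st
    | some (op, s, p) => (st.1 + (if op == some '+' then s else p), none)
  else
    let (op, s, p) := st.2.getD (none, 0, 1)
    let op := if op == none && pvLastC col ≠ ' ' then some (pvLastC col) else op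
    let n := pvNumOf col
    (st.1, some (op, s + n, p * n))

-- Source B's trailing `if in_group: result += …`
def pvFinB (st : Int × Option (Option Char × Int × Int)) : Int :=
  match st.2 with
  | none => st.1
  | some (op, s, p) => st.1 + (if op == some '+' then s else p)

def day06b_alt (colums : List String) : Int :=
  pvFinB (colums.foldl pvStepB (0, none))

-- ===== PRECONDITION & SPEC =====
-- Pre_ excludes exactly the inputs where Python A (and B alike) raises ValueError: a non-all-space
-- column whose chars-but-last contain no digit makes int("") raise.
def Pre_day06b (colums : List String) : Prop :=
  ∀ col ∈ colums, pvBlank col = false → col.toList.dropLast.any Char.isDigit = true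
instance (colums : List String) : Decidable (Pre_day06b colums) := by unfold Pre_day06b; infer_instance

def pvWitness_day06b : List String := ["12+", "34 ", "   ", "5*", "6 "]

def Spec_day06b (colums : List String) (out : Int) : Prop := out = day06b_alt colums
instance (colums : List String) (out : Int) : Decidable (Spec_day06b colums out) := by unfold Spec_day06b; infer_instance

-- ===== CLAIM (what is proved, stated in full; the proofs are below) =====
def Claim_equal_day06b : Prop := ∀ (colums : List String), Dom_day06b colums → Pre_day06b colums → Spec_day06b colums (day06b colums)

-- ===== LEMMAS AND PROOFS =====

-- reference value of one group
def pvGVal (g : List String) : Int :=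
  if pvFindOpA g == some '+' then (g.map pvNumOf).sum else (g.map pvNumOf).prod

-- value of one problem pair
def pvPVal (p : List Int × Option Char) : Int :=
  if p.2 == some '+' then p.1.foldl (· + ·) 0 else p.1.foldl (· * ·) 1

-- B's in-group state after consuming the (nonempty) current group cur
def pvEnc (cur : List String) : Option (Option Char × Int × Int) :=
  if cur = [] then none
  else some (pvFindOpA cur, (cur.map pvNumOf).sum, (cur.map pvNumOf).prod)

-- phase-1 prefix lemma: the accumulated groups list is a passive prefix
theorem pvStepA_prefix (l : List String) (gs : List (List String)) (cur : List String) :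
    l.foldl pvStepA (gs, cur) =
      (gs ++ (l.foldl pvStepA ([], cur)).1, (l.foldl pvStepA ([], cur)).2) := by
  induction l generalizing gs cur with
  | nil => simp
  | cons col l ih =>
    simp only [List.foldl_cons]
    by_cases hb : pvBlank col
    · by_cases hc : cur = []
      · subst hc
        simp only [pvStepA, hb, if_true, ne_eq, not_true_eq_false]
        exact ih gs []
      · simp only [pvStepA, hb, if_true, ne_eq, hc, not_false_iff, if_true]
        rw [ih (gs ++ [cur]) [], ih ([] ++ [cur]) []]
        simp
    · simp only [pvStepA, hb]
      exact ih gs (cur ++ [col])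

-- find-op extension by one column at the right
theorem pvFindOpA_append (cur : List String) (col : String) :
    pvFindOpA (cur ++ [col]) =
      (if pvFindOpA cur == none && pvLastC col ≠ ' ' then some (pvLastC col) else pvFindOpA cur) := by
  induction cur with
  | nil => simp [pvFindOpA]
  | cons c0 rest ih =>
    simp only [List.cons_append, pvFindOpA]
    by_cases h : pvLastC c0 = ' '
    · simp [h, ih]
    · simp [h]

-- B invariant: processing l from (r, enc cur) ends at r plus the value of every group of cur ++ l
theorem pvB_inv (l : List String) (r : Int) (cur : List String) :
    pvFinB (l.foldl pvStepB (r, pvEnc cur)) =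
      r + ((((l.foldl pvStepA ([], cur)).1) ++
            (if (l.foldl pvStepA ([], cur)).2 ≠ [] then [(l.foldl pvStepA ([], cur)).2] else [])).map pvGVal).sum := by
  induction l generalizing r cur with
  | nil =>
    by_cases hc : cur = []
    · subst hc; simp [pvFinB, pvEnc]
    · simp [pvFinB, pvEnc, hc, pvGVal]
  | cons col l ih =>
    by_cases hb : pvBlank col
    · by_cases hc : cur = []
      · subst hc
        have h1 : pvStepB (r, pvEnc []) col = (r, pvEnc []) := by simp [pvStepB, pvEnc, hb]
        have h2 : pvStepA ([], []) col = ([], []) := by simp [pvStepA, hb]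
        simp only [List.foldl_cons, h1, h2]
        exact ih r []
      · have h1 : pvStepB (r, pvEnc cur) col =
            (r + (if pvFindOpA cur == some '+' then (cur.map pvNumOf).sum else (cur.map pvNumOf).prod), pvEnc []) := by
          simp [pvStepB, pvEnc, hb, hc]
        have h2 : pvStepA ([], cur) col = ([cur], []) := by simp [pvStepA, hb, hc]
        simp only [List.foldl_cons, h1, h2]
        rw [ih _ [], pvStepA_prefix l [cur] []]
        simp [pvGVal, add_assoc]
    · have h2 : pvStepA ([], cur) col = ([], cur ++ [col]) := by simp [pvStepA, hb]
      have h1 : pvStepB (r, pvEnc cur) col = (r, pvEnc (cur ++ [col])) := by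
        by_cases hc : cur = []
        · subst hc; simp [pvStepB, pvEnc, hb, pvFindOpA]
        · simp [pvStepB, pvEnc, hb, hc, pvFindOpA_append]
      simp only [List.foldl_cons, h1, h2]
      exact ih r (cur ++ [col])

-- A's per-problem value of a group equals pvGVal (the reverse disappears by sum/prod commutativity)
theorem pvPVal_eq_gval (g : List String) :
    pvPVal (g.reverse.foldl (fun ns col => ns ++ [pvNumOf col]) [], pvFindOpA g) = pvGVal g := by
  rw [PySem.List.foldl_append_singleton_eq_map, List.nil_append, List.map_reverse]
  unfold pvPVal pvGVal
  by_cases h : pvFindOpA g == some '+'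
  · simp only [h, if_true]
    rw [← List.sum_eq_foldl, List.sum_reverse]
  · simp only [h]
    rw [← List.prod_eq_foldl, List.prod_reverse]
    simp

theorem pvStep3_shift (l : List (List Int × Option Char)) (r : Int) :
    l.foldl pvStep3 r = r + (l.map pvPVal).sum := by
  have h : pvStep3 = fun result p => result + pvPVal p := by
    funext result p
    unfold pvStep3 pvPVal
    by_cases h : p.2 == some '+' <;> simp [h]
  rw [h, PySem.List.foldl_add]

theorem pvA_eq (colums : List String) :
    day06b colums =
      ((((colums.foldl pvStepA ([], [])).1) ++
        (if (colums.foldl pvStepA ([], [])).2 ≠ [] then [(colums.foldl pvStepA ([], [])).2] else [])).map pvGVal).sum := by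
  simp only [day06b]
  set groups := ((colums.foldl pvStepA ([], [])).1 ++
      (if (colums.foldl pvStepA ([], [])).2 ≠ [] then [(colums.foldl pvStepA ([], [])).2] else []))
    with hg
  have hsplit : (if (colums.foldl pvStepA ([], [])).2 ≠ [] then
        (colums.foldl pvStepA ([], [])).1 ++ [(colums.foldl pvStepA ([], [])).2]
      else (colums.foldl pvStepA ([], [])).1) = groups := by
    rw [hg]; by_cases h : (colums.foldl pvStepA ([], [])).2 = [] <;> simp [h]
  rw [hsplit]
  have h2 : groups.foldl pvStep2 [] =
      groups.map (fun g => (g.reverse.foldl (fun ns col => ns ++ [pvNumOf col]) [], pvFindOpA g)) := by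
    exact (PySem.List.foldl_append_singleton_eq_map
      (fun g => (g.reverse.foldl (fun ns col => ns ++ [pvNumOf col]) [], pvFindOpA g)) groups []).trans
      (List.nil_append _)
  rw [h2, pvStep3_shift, List.map_map]
  simp only [Function.comp_def, pvPVal_eq_gval, zero_add]

theorem day06b_spec : Claim_equal_day06b := by
  intro colums _ _
  unfold Spec_day06b
  rw [pvA_eq]
  have h := pvB_inv colums 0 []
  rw [show (pvEnc [] : Option (Option Char × Int × Int)) = none from rfl] at h
  unfold day06b_alt
  rw [h, zero_add]
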